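-- pv_equiv track=rewrite | github.com/maverikod/vvz-code-analyzis | test_data/bhlff/models/level_b/node_analysis/charge_computation.py | _compute_7d_levi_civita
-- ===== SOURCE A (Python) =====
-- def _compute_7d_levi_civita(
--     mu: int, nu: int, rho: int, sigma: int, tau: int
-- ) -> int:
--     """
--     Compute 7D Levi-Civita symbol.
--
--     Physical Meaning:
--         Computes the 7D Levi-Civita symbol ε^{μνρστ} which is
--         +1 for even permutations, -1 for odd permutations, and 0 otherwise.
--     """
--     # Check if all indices are different
--     indices = [mu, nu, rho, sigma, tau]
--     if len(set(indices)) != len(indices):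
--         return 0  # Repeated indices
--
--     # Check if indices are in valid range [0, 6]
--     if not all(0 <= idx <= 6 for idx in indices):
--         return 0
--
--     # Compute permutation sign
--     permutation = indices.copy()
--     sign = 1
--
--     # Bubble sort to count inversions
--     for i in range(len(permutation)):
--         for j in range(len(permutation) - 1 - i):
--             if permutation[j] > permutation[j + 1]:
--                 permutation[j], permutation[j + 1] = (
--                     permutation[j + 1],
--                     permutation[j],
--                 )
--                 sign *= -1
--
--     return sign
-- ===== SOURCE B (Python) =====
-- def _compute_7d_levi_civita(mu: int, nu: int, rho: int, sigma: int, tau: int) -> int: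
--     indices = [mu, nu, rho, sigma, tau]
--     if len(set(indices)) != len(indices):
--         return 0  # Repeated indices
--     if not all(0 <= idx <= 6 for idx in indices):
--         return 0
--     # Count inversions directly: no sorting, no mutation, just a counter.
--     inv = 0
--     for i in range(5):
--         for j in range(i + 1, 5):
--             if indices[i] > indices[j]:
--                 inv += 1
--     return 1 if inv % 2 == 0 else -1
-- ===== Notes on version B (the rewrite author's own statement) =====
-- stated objective: simpler
-- what changed: B replaces the bubble sort over a mutable copy (tracking a sign through swaps) by a direct pairwise inversion count over the unmodified index list, converted to a sign by parity.
import Mathlib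
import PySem

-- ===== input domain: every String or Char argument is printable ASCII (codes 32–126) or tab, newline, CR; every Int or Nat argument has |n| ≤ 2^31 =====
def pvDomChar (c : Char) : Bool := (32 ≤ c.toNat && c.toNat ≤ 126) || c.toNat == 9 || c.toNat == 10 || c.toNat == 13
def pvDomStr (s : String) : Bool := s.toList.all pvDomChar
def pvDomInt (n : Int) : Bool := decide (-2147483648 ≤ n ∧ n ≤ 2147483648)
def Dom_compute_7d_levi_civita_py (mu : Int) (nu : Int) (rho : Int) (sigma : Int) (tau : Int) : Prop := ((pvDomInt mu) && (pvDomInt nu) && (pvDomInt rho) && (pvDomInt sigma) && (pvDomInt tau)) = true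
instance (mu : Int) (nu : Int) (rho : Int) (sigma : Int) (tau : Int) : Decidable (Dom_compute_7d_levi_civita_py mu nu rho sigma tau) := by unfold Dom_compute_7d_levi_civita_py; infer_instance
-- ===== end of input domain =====

-- B replaces A's bubble sort over a mutable copy by a direct pairwise inversion count turned into a sign by parity (simpler).


-- ===== PORT A =====
-- one bubble-sort comparison step at position j: swap and flip the sign if out of order
def pvBubbleStep (st : List Int × Int) (j : Nat) : List Int × Int :=
  if PySem.List.pyGetD st.1 (j : Int) 0 > PySem.List.pyGetD st.1 ((j : Int) + 1) 0 then
    (PySem.List.pySetD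
       (PySem.List.pySetD st.1 (j : Int) (PySem.List.pyGetD st.1 ((j : Int) + 1) 0))
       ((j : Int) + 1) (PySem.List.pyGetD st.1 (j : Int) 0),
     -st.2)
  else st

-- the nested bubble-sort loops of A, started on the copy of `indices` with sign 1
def pvBubbleSign (indices : List Int) : Int :=
  ((List.range indices.length).foldl
    (fun st i => (List.range (indices.length - 1 - i)).foldl pvBubbleStep st)
    (indices, 1)).2

def compute_7d_levi_civita_py (mu : Int) (nu : Int) (rho : Int) (sigma : Int) (tau : Int) : Int :=
  let indices : List Int := [mu, nu, rho, sigma, tau]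
  if (PySem.Set.ofList indices).length ≠ indices.length then 0
  else if ¬ (indices.all fun idx => decide (0 ≤ idx) && decide (idx ≤ 6)) = true then 0
  else pvBubbleSign indices

-- ===== PORT B =====
-- the inversion-counting double loop of B: no mutation, no sorting, just a counter
def pvInvSign (indices : List Int) : Int :=
  let inv : Int :=
    (PySem.List.pyRange 0 5 1).foldl
      (fun acc i =>
        (PySem.List.pyRange (i + 1) 5 1).foldl
          (fun acc j =>
            if PySem.List.pyGetD indices i 0 > PySem.List.pyGetD indices j 0 then acc + 1 else acc)
          acc)
      0
  if PySem.Int.mod inv 2 = 0 then 1 else -1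

def compute_7d_levi_civita_py_alt (mu : Int) (nu : Int) (rho : Int) (sigma : Int) (tau : Int) : Int :=
  let indices : List Int := [mu, nu, rho, sigma, tau]
  if (PySem.Set.ofList indices).length ≠ indices.length then 0
  else if ¬ (indices.all fun idx => decide (0 ≤ idx) && decide (idx ≤ 6)) = true then 0
  else pvInvSign indices

-- ===== PRECONDITION & SPEC =====
def Spec_compute_7d_levi_civita_py (mu : Int) (nu : Int) (rho : Int) (sigma : Int) (tau : Int) (out : Int) : Prop := out = compute_7d_levi_civita_py_alt mu nu rho sigma tau
instance (mu : Int) (nu : Int) (rho : Int) (sigma : Int) (tau : Int) (out : Int) : Decidable (Spec_compute_7d_levi_civita_py mu nu rho sigma tau out) := by unfold Spec_compute_7d_levi_civita_py; infer_instance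

-- ===== CLAIM (what is proved, stated in full; the proofs are below) =====
def Claim_equal_compute_7d_levi_civita_py : Prop := ∀ (mu : Int) (nu : Int) (rho : Int) (sigma : Int) (tau : Int), Dom_compute_7d_levi_civita_py mu nu rho sigma tau → Spec_compute_7d_levi_civita_py mu nu rho sigma tau (compute_7d_levi_civita_py mu nu rho sigma tau)

-- ===== LEMMAS AND PROOFS =====

-- Bool check for one tuple: if the five values are pairwise distinct, the two cores agree
def pvDistinct (a b c d e : Nat) : Bool :=
  a != b && a != c && a != d && a != e && b != c && b != d && b != e && c != d && c != e && d != e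
def pvCheck (a b c d e : Nat) : Bool :=
  !pvDistinct a b c d e ||
    (pvBubbleSign [(a : Int), (b : Int), (c : Int), (d : Int), (e : Int)]
      == pvInvSign [(a : Int), (b : Int), (c : Int), (d : Int), (e : Int)])

-- exhaustive check over all tuples in [0,6]^5: one chunk per (a,b), enumerating (c,d,e) by base-7 decoding
def pvChunk (a b : Nat) : Bool :=
  (List.range 343).all fun i => pvCheck a b (i / 49) ((i / 7) % 7) (i % 7)

set_option maxRecDepth 1000000 in
theorem pv_c_0_0 : pvChunk 0 0 = true := by decide
set_option maxRecDepth 1000000 in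
theorem pv_c_0_1 : pvChunk 0 1 = true := by decide
set_option maxRecDepth 1000000 in
theorem pv_c_0_2 : pvChunk 0 2 = true := by decide
set_option maxRecDepth 1000000 in
theorem pv_c_0_3 : pvChunk 0 3 = true := by decide
set_option maxRecDepth 1000000 in
theorem pv_c_0_4 : pvChunk 0 4 = true := by decide
set_option maxRecDepth 1000000 in
theorem pv_c_0_5 : pvChunk 0 5 = true := by decide
set_option maxRecDepth 1000000 in
theorem pv_c_0_6 : pvChunk 0 6 = true := by decide
set_option maxRecDepth 1000000 in
theorem pv_c_1_0 : pvChunk 1 0 = true := by decide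
set_option maxRecDepth 1000000 in
theorem pv_c_1_1 : pvChunk 1 1 = true := by decide
set_option maxRecDepth 1000000 in
theorem pv_c_1_2 : pvChunk 1 2 = true := by decide
set_option maxRecDepth 1000000 in
theorem pv_c_1_3 : pvChunk 1 3 = true := by decide
set_option maxRecDepth 1000000 in
theorem pv_c_1_4 : pvChunk 1 4 = true := by decide
set_option maxRecDepth 1000000 in
theorem pv_c_1_5 : pvChunk 1 5 = true := by decide
set_option maxRecDepth 1000000 in
theorem pv_c_1_6 : pvChunk 1 6 = true := by decide
set_option maxRecDepth 1000000 in
theorem pv_c_2_0 : pvChunk 2 0 = true := by decide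
set_option maxRecDepth 1000000 in
theorem pv_c_2_1 : pvChunk 2 1 = true := by decide
set_option maxRecDepth 1000000 in
theorem pv_c_2_2 : pvChunk 2 2 = true := by decide
set_option maxRecDepth 1000000 in
theorem pv_c_2_3 : pvChunk 2 3 = true := by decide
set_option maxRecDepth 1000000 in
theorem pv_c_2_4 : pvChunk 2 4 = true := by decide
set_option maxRecDepth 1000000 in
theorem pv_c_2_5 : pvChunk 2 5 = true := by decide
set_option maxRecDepth 1000000 in
theorem pv_c_2_6 : pvChunk 2 6 = true := by decide
set_option maxRecDepth 1000000 in
theorem pv_c_3_0 : pvChunk 3 0 = true := by decide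
set_option maxRecDepth 1000000 in
theorem pv_c_3_1 : pvChunk 3 1 = true := by decide
set_option maxRecDepth 1000000 in
theorem pv_c_3_2 : pvChunk 3 2 = true := by decide
set_option maxRecDepth 1000000 in
theorem pv_c_3_3 : pvChunk 3 3 = true := by decide
set_option maxRecDepth 1000000 in
theorem pv_c_3_4 : pvChunk 3 4 = true := by decide
set_option maxRecDepth 1000000 in
theorem pv_c_3_5 : pvChunk 3 5 = true := by decide
set_option maxRecDepth 1000000 in
theorem pv_c_3_6 : pvChunk 3 6 = true := by decide
set_option maxRecDepth 1000000 in
theorem pv_c_4_0 : pvChunk 4 0 = true := by decide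
set_option maxRecDepth 1000000 in
theorem pv_c_4_1 : pvChunk 4 1 = true := by decide
set_option maxRecDepth 1000000 in
theorem pv_c_4_2 : pvChunk 4 2 = true := by decide
set_option maxRecDepth 1000000 in
theorem pv_c_4_3 : pvChunk 4 3 = true := by decide
set_option maxRecDepth 1000000 in
theorem pv_c_4_4 : pvChunk 4 4 = true := by decide
set_option maxRecDepth 1000000 in
theorem pv_c_4_5 : pvChunk 4 5 = true := by decide
set_option maxRecDepth 1000000 in
theorem pv_c_4_6 : pvChunk 4 6 = true := by decide
set_option maxRecDepth 1000000 in
theorem pv_c_5_0 : pvChunk 5 0 = true := by decide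
set_option maxRecDepth 1000000 in
theorem pv_c_5_1 : pvChunk 5 1 = true := by decide
set_option maxRecDepth 1000000 in
theorem pv_c_5_2 : pvChunk 5 2 = true := by decide
set_option maxRecDepth 1000000 in
theorem pv_c_5_3 : pvChunk 5 3 = true := by decide
set_option maxRecDepth 1000000 in
theorem pv_c_5_4 : pvChunk 5 4 = true := by decide
set_option maxRecDepth 1000000 in
theorem pv_c_5_5 : pvChunk 5 5 = true := by decide
set_option maxRecDepth 1000000 in
theorem pv_c_5_6 : pvChunk 5 6 = true := by decide
set_option maxRecDepth 1000000 in
theorem pv_c_6_0 : pvChunk 6 0 = true := by decide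
set_option maxRecDepth 1000000 in
theorem pv_c_6_1 : pvChunk 6 1 = true := by decide
set_option maxRecDepth 1000000 in
theorem pv_c_6_2 : pvChunk 6 2 = true := by decide
set_option maxRecDepth 1000000 in
theorem pv_c_6_3 : pvChunk 6 3 = true := by decide
set_option maxRecDepth 1000000 in
theorem pv_c_6_4 : pvChunk 6 4 = true := by decide
set_option maxRecDepth 1000000 in
theorem pv_c_6_5 : pvChunk 6 5 = true := by decide
set_option maxRecDepth 1000000 in
theorem pv_c_6_6 : pvChunk 6 6 = true := by decide

theorem pv_chunk_elim (a b c d e : Nat) (h : pvChunk a b = true) (hc : c < 7) (hd : d < 7)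
    (he : e < 7) : pvCheck a b c d e = true := by
  have h2 := List.all_eq_true.mp h (c * 49 + d * 7 + e) (List.mem_range.mpr (by omega))
  have e1 : (c * 49 + d * 7 + e) / 49 = c := by omega
  have e2 : ((c * 49 + d * 7 + e) / 7) % 7 = d := by omega
  have e3 : (c * 49 + d * 7 + e) % 7 = e := by omega
  rwa [e1, e2, e3] at h2

theorem pv_chunk_all (a b : Nat) (ha : a < 7) (hb : b < 7) : pvChunk a b = true :=
  match a, b, ha, hb with
  | 0, 0, _, _ => pv_c_0_0
  | 0, 1, _, _ => pv_c_0_1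
  | 0, 2, _, _ => pv_c_0_2
  | 0, 3, _, _ => pv_c_0_3
  | 0, 4, _, _ => pv_c_0_4
  | 0, 5, _, _ => pv_c_0_5
  | 0, 6, _, _ => pv_c_0_6
  | 1, 0, _, _ => pv_c_1_0
  | 1, 1, _, _ => pv_c_1_1
  | 1, 2, _, _ => pv_c_1_2
  | 1, 3, _, _ => pv_c_1_3
  | 1, 4, _, _ => pv_c_1_4
  | 1, 5, _, _ => pv_c_1_5
  | 1, 6, _, _ => pv_c_1_6
  | 2, 0, _, _ => pv_c_2_0
  | 2, 1, _, _ => pv_c_2_1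
  | 2, 2, _, _ => pv_c_2_2
  | 2, 3, _, _ => pv_c_2_3
  | 2, 4, _, _ => pv_c_2_4
  | 2, 5, _, _ => pv_c_2_5
  | 2, 6, _, _ => pv_c_2_6
  | 3, 0, _, _ => pv_c_3_0
  | 3, 1, _, _ => pv_c_3_1
  | 3, 2, _, _ => pv_c_3_2
  | 3, 3, _, _ => pv_c_3_3
  | 3, 4, _, _ => pv_c_3_4
  | 3, 5, _, _ => pv_c_3_5
  | 3, 6, _, _ => pv_c_3_6
  | 4, 0, _, _ => pv_c_4_0
  | 4, 1, _, _ => pv_c_4_1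
  | 4, 2, _, _ => pv_c_4_2
  | 4, 3, _, _ => pv_c_4_3
  | 4, 4, _, _ => pv_c_4_4
  | 4, 5, _, _ => pv_c_4_5
  | 4, 6, _, _ => pv_c_4_6
  | 5, 0, _, _ => pv_c_5_0
  | 5, 1, _, _ => pv_c_5_1
  | 5, 2, _, _ => pv_c_5_2
  | 5, 3, _, _ => pv_c_5_3
  | 5, 4, _, _ => pv_c_5_4
  | 5, 5, _, _ => pv_c_5_5
  | 5, 6, _, _ => pv_c_5_6
  | 6, 0, _, _ => pv_c_6_0
  | 6, 1, _, _ => pv_c_6_1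
  | 6, 2, _, _ => pv_c_6_2
  | 6, 3, _, _ => pv_c_6_3
  | 6, 4, _, _ => pv_c_6_4
  | 6, 5, _, _ => pv_c_6_5
  | 6, 6, _, _ => pv_c_6_6
  | _+7, _, ha, _ => absurd ha (by omega)
  | _, _+7, _, hb => absurd hb (by omega)

theorem pv_key (a b c d e : Nat) (ha : a < 7) (hb : b < 7) (hc : c < 7) (hd : d < 7)
    (he : e < 7) : pvCheck a b c d e = true :=
  pv_chunk_elim a b c d e (pv_chunk_all a b ha hb) hc hd he

-- set(xs) of a list with duplicates is strictly shorter
theorem pv_ofList_sublist {α : Type} [BEq α] [LawfulBEq α] (xs : List α) :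
    (PySem.Set.ofList xs).Sublist xs := by
  induction xs with
  | nil => simp [PySem.Set.ofList_nil]
  | cons x xs ih =>
    rw [PySem.Set.ofList_cons]
    refine List.Sublist.cons₂ x (List.Sublist.trans ?_ ih)
    simp [PySem.Set.discard]

theorem pv_dup_len {α : Type} [BEq α] [LawfulBEq α] (xs : List α) (h : ¬ xs.Nodup) :
    (PySem.Set.ofList xs).length ≠ xs.length := by
  intro hlen
  exact h ((pv_ofList_sublist xs).eq_of_length hlen ▸ PySem.Set.nodup_ofList xs)

-- ===== VERDICT (by name: the statement is the Claim_ definition above) =====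
theorem compute_7d_levi_civita_py_spec : Claim_equal_compute_7d_levi_civita_py := by
  intro mu nu rho sigma tau _
  unfold Spec_compute_7d_levi_civita_py
  simp only [compute_7d_levi_civita_py, compute_7d_levi_civita_py_alt]
  split_ifs with h1 h2
  · rfl
  case neg => rfl
  · have hnd : ([mu, nu, rho, sigma, tau] : List Int).Nodup := by
      by_contra h
      exact pv_dup_len _ h (not_not.mp h1)
    have hall := h2
    have hb : (0 ≤ mu ∧ mu ≤ 6) ∧ (0 ≤ nu ∧ nu ≤ 6) ∧ (0 ≤ rho ∧ rho ≤ 6) ∧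
        (0 ≤ sigma ∧ sigma ≤ 6) ∧ 0 ≤ tau ∧ tau ≤ 6 := by simpa [List.all] using hall
    obtain ⟨⟨b1, b2⟩, ⟨b3, b4⟩, ⟨b5, b6⟩, ⟨b7, b8⟩, b9, b10⟩ := hb
    have hne : mu ≠ nu ∧ mu ≠ rho ∧ mu ≠ sigma ∧ mu ≠ tau ∧ nu ≠ rho ∧ nu ≠ sigma ∧
        nu ≠ tau ∧ rho ≠ sigma ∧ rho ≠ tau ∧ sigma ≠ tau := by
      simpa [List.nodup_cons, and_assoc] using hnd
    obtain ⟨n1, n2, n3, n4, n5, n6, n7, n8, n9, n10⟩ := hne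
    have hk := pv_key mu.toNat nu.toNat rho.toNat sigma.toNat tau.toNat
      (by omega) (by omega) (by omega) (by omega) (by omega)
    have hd : pvDistinct mu.toNat nu.toNat rho.toNat sigma.toNat tau.toNat = true := by
      simp only [pvDistinct, Bool.and_eq_true, bne_iff_ne]
      omega
    rw [pvCheck, hd] at hk
    simp only [Bool.not_true, Bool.false_or, beq_iff_eq] at hk
    have emu : ((mu.toNat : Nat) : Int) = mu := Int.toNat_of_nonneg b1
    have enu : ((nu.toNat : Nat) : Int) = nu := Int.toNat_of_nonneg b3
    have erho : ((rho.toNat : Nat) : Int) = rho := Int.toNat_of_nonneg b5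
    have esig : ((sigma.toNat : Nat) : Int) = sigma := Int.toNat_of_nonneg b7
    have etau : ((tau.toNat : Nat) : Int) = tau := Int.toNat_of_nonneg b9
    rw [emu, enu, erho, esig, etau] at hk
    exact hk
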